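-- pv_equiv track=rewrite | github.com/slacker298/blanier-Dashboards | ShortInterestDash/app.py | rolling_consecutives
-- ===== SOURCE A (Python) =====
-- def rolling_consecutives(s):
--
--     cons = 0
--     outlist = []
--     for i in range(len(s)):
--
--         if s[i] == 1:
--             cons += 1
--         else:
--             cons = 0
--
--         outlist.append(cons)
--
--     return outlist
-- ===== SOURCE B (Python) =====
-- from itertools import groupby
--
-- def rolling_consecutives(s):
--     out = []
--     for is_one, grp in groupby(s, key=lambda x: x == 1):
--         n = sum(1 for _ in grp)
--         out.extend(range(1, n + 1) if is_one else [0] * n)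
--     return out
-- ===== Notes on version B (the rewrite author's own statement) =====
-- stated objective: idiomatic
-- what changed: B splits the list into maximal runs with itertools.groupby and emits 1..n for a run of ones and n zeros otherwise, instead of A's element-by-element counter accumulator.
import Mathlib
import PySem

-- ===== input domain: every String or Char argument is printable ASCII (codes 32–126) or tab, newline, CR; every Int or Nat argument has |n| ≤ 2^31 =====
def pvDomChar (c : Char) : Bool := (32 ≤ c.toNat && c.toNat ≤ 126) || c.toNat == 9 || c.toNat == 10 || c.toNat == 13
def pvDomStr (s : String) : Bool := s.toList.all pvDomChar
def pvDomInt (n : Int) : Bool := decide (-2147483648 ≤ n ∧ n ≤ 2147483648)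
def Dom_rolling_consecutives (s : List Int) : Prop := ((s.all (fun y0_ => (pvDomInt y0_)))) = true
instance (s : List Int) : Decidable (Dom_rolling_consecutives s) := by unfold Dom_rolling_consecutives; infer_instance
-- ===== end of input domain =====

-- ===== PORT A =====
-- B builds the output run-by-run (groupby) instead of A's per-element counter; alternative decomposition, same cost.
def rolling_consecutives (s : List Int) : List Int :=
  (PySem.List.pyRange 0 (s.length : Int) 1).foldl
    (fun (st : Int × List Int) i =>
      let cons := if PySem.List.pyGetD s i 0 == 1 then st.1 + 1 else 0
      (cons, st.2 ++ [cons]))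
    (0, []) |>.2

-- ===== PORT B =====
-- transliteration of Source B: groupby on (x == 1); each run of length n emits range(1, n+1) or n zeros
def rc_alt_go : List Int → List Int
  | [] => []
  | x :: xs =>
    let key := (x == 1)
    let run := xs.takeWhile (fun y => (y == 1) == key)
    let rest := xs.dropWhile (fun y => (y == 1) == key)
    let n : Int := (run.length : Int) + 1
    (if key then PySem.List.pyRange 1 (n + 1) 1 else List.replicate (run.length + 1) 0)
      ++ rc_alt_go rest
termination_by s => s.length
decreasing_by
  exact Nat.lt_succ_of_le (List.length_dropWhile_le _ _)

def rolling_consecutives_alt (s : List Int) : List Int := rc_alt_go s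

-- ===== PRECONDITION & SPEC =====
def Spec_rolling_consecutives (s : List Int) (out : List Int) : Prop := out = rolling_consecutives_alt s
instance (s : List Int) (out : List Int) : Decidable (Spec_rolling_consecutives s out) := by unfold Spec_rolling_consecutives; infer_instance

-- ===== CLAIM (what is proved, stated in full; the proofs are below) =====
def Claim_equal_rolling_consecutives : Prop := ∀ (s : List Int), Dom_rolling_consecutives s → Spec_rolling_consecutives s (rolling_consecutives s)

-- ===== LEMMAS AND PROOFS =====

-- reference recursion: counter-threaded rolling count
def rcGo (c : Int) : List Int → List Int
  | [] => []
  | x :: xs => let c' := if x = 1 then c + 1 else 0; c' :: rcGo c' xs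

lemma foldl_eq_rcGo (s : List Int) (c : Int) (acc : List Int) :
    (s.foldl (fun (st : Int × List Int) v =>
      let cons := if v == 1 then st.1 + 1 else 0
      (cons, st.2 ++ [cons])) (c, acc)).2 = acc ++ rcGo c s := by
  induction s generalizing c acc with
  | nil => simp [rcGo]
  | cons x xs ih =>
    simp only [List.foldl_cons, rcGo]
    rw [ih]
    by_cases h : x = 1 <;> simp [h]

lemma A_eq_rcGo (s : List Int) : rolling_consecutives s = rcGo 0 s := by
  unfold rolling_consecutives
  rw [PySem.List.foldl_pyRange_zero_pyGetD' s 0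
        (fun (st : Int × List Int) v =>
          let cons := if v == 1 then st.1 + 1 else 0
          (cons, st.2 ++ [cons])) (0, [])]
  simpa using foldl_eq_rcGo s 0 []

lemma rcGo_reset (c : Int) (rest : List Int)
    (h : rest = [] ∨ ∃ y ys, rest = y :: ys ∧ y ≠ 1) :
    rcGo c rest = rcGo 0 rest := by
  rcases h with h | ⟨y, ys, rfl, hy⟩
  · subst h; simp [rcGo]
  · simp [rcGo, hy]

lemma rcGo_ones (run : List Int) (hrun : ∀ y ∈ run, y = 1) (c : Int) (rest : List Int) :
    rcGo c (run ++ rest) =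
      PySem.List.pyRange (c + 1) (c + 1 + (run.length : Int)) 1 ++ rcGo (c + (run.length : Int)) rest := by
  induction run generalizing c with
  | nil => simp [PySem.List.pyRange_one_eq_nil]
  | cons x xs ih =>
    have hx : x = 1 := hrun x (by simp)
    have hxs : ∀ y ∈ xs, y = 1 := fun y hy => hrun y (by simp [hy])
    simp only [List.cons_append, rcGo, hx, if_pos, List.length_cons]
    rw [ih hxs (c + 1)]
    push_cast
    rw [PySem.List.pyRange_one_cons (by omega : c + 1 < c + 1 + ((((xs.length : Nat) : Int)) + 1))]
    ring_nf
    simp [List.cons_append]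

lemma rcGo_zeros (run : List Int) (hrun : ∀ y ∈ run, y ≠ 1) (c : Int) (rest : List Int)
    (hne : run ≠ []) :
    rcGo c (run ++ rest) = List.replicate run.length 0 ++ rcGo 0 rest := by
  induction run generalizing c with
  | nil => exact absurd rfl hne
  | cons x xs ih =>
    have hx : x ≠ 1 := hrun x (by simp)
    have hxs : ∀ y ∈ xs, y ≠ 1 := fun y hy => hrun y (by simp [hy])
    simp only [List.cons_append, rcGo, if_neg hx, List.length_cons, List.replicate_succ,
      List.cons_append]
    rcases Decidable.em (xs = []) with h | h
    · subst h; simp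
    · exact congrArg _ (ih hxs 0 h)

lemma B_len_eq_rcGo : ∀ (n : Nat) (s : List Int), s.length ≤ n → rc_alt_go s = rcGo 0 s := by
  intro n
  induction n with
  | zero =>
    intro s hs
    have : s = [] := List.length_eq_zero_iff.mp (Nat.le_zero.mp hs)
    subst this; simp [rc_alt_go, rcGo]
  | succ n ih =>
    intro s hs
    rcases s with _ | ⟨x, xs⟩
    · simp [rc_alt_go, rcGo]
    · rw [rc_alt_go]
      set key := (x == 1) with hkeydef
      set run := xs.takeWhile (fun y => (y == 1) == key) with hrundef
      set rest := xs.dropWhile (fun y => (y == 1) == key) with hrestdef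
      have hsplit : xs = run ++ rest := (List.takeWhile_append_dropWhile).symm
      have hrestlen : rest.length ≤ n := by
        have h := List.length_dropWhile_le (fun y => (y == 1) == key) xs
        rw [← hrestdef] at h
        simp only [List.length_cons] at hs
        omega
      have ihrest := ih rest hrestlen
      rw [ihrest]
      have hrest : rest = [] ∨ ∃ y ys, rest = y :: ys ∧ (y == 1) ≠ key := by
        rcases hr : rest with _ | ⟨y, ys⟩
        · exact Or.inl rfl
        · refine Or.inr ⟨y, ys, rfl, ?_⟩
          have hdw := List.head?_dropWhile_not (fun y => (y == 1) == key) xs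
          rw [← hrestdef, hr] at hdw
          simp only [List.head?_cons] at hdw
          intro hcontra
          simp [hcontra] at hdw
      by_cases hx : x = 1
      · have hkey : key = true := by simp [hkeydef, hx]
        have hrun : ∀ y ∈ run, y = 1 := by
          intro y hy
          have := List.mem_takeWhile_imp hy
          simp [hkey] at this; exact this
        have hall : ∀ y ∈ x :: run, y = 1 := by
          intro y hy; rcases List.mem_cons.mp hy with h | h
          · exact h ▸ hx
          · exact hrun y h
        have hresetc : rcGo (0 + (((x :: run).length : Int))) rest = rcGo 0 rest := by
          apply rcGo_reset
          rcases hrest with h | ⟨y, ys, hr, hy⟩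
          · exact Or.inl h
          · exact Or.inr ⟨y, ys, hr, fun h1 => hy (by simp [h1, hkey])⟩
        calc (if key then PySem.List.pyRange 1 (((run.length : Int) + 1) + 1) 1
                else List.replicate (run.length + 1) 0) ++ rcGo 0 rest
            = PySem.List.pyRange 1 (((run.length : Int) + 1) + 1) 1 ++ rcGo 0 rest := by
              rw [hkey]; simp
          _ = PySem.List.pyRange (0 + 1) (0 + 1 + (((x :: run).length : Int))) 1
                ++ rcGo (0 + (((x :: run).length : Int))) rest := by
              rw [hresetc]
              simp only [List.length_cons]
              push_cast
              ring_nf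
          _ = rcGo 0 ((x :: run) ++ rest) := (rcGo_ones (x :: run) hall 0 rest).symm
          _ = rcGo 0 (x :: xs) := by rw [List.cons_append, ← hsplit]
      · have hkey : key = false := by simp [hkeydef, hx]
        have hrun : ∀ y ∈ run, y ≠ 1 := by
          intro y hy
          have := List.mem_takeWhile_imp hy
          simp [hkey] at this; exact this
        have hall : ∀ y ∈ x :: run, y ≠ 1 := by
          intro y hy; rcases List.mem_cons.mp hy with h | h
          · exact h ▸ hx
          · exact hrun y h
        calc (if key then PySem.List.pyRange 1 (((run.length : Int) + 1) + 1) 1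
                else List.replicate (run.length + 1) 0) ++ rcGo 0 rest
            = List.replicate (run.length + 1) 0 ++ rcGo 0 rest := by rw [hkey]; simp
          _ = List.replicate ((x :: run).length) 0 ++ rcGo 0 rest := by
              simp [List.length_cons]
          _ = rcGo 0 ((x :: run) ++ rest) := (rcGo_zeros (x :: run) hall 0 rest (by simp)).symm
          _ = rcGo 0 (x :: xs) := by rw [List.cons_append, ← hsplit]

lemma B_eq_rcGo (s : List Int) : rc_alt_go s = rcGo 0 s :=
  B_len_eq_rcGo s.length s (Nat.le_refl _)

-- ===== VERDICT (by name: the statement is the Claim_ definition above) =====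
theorem rolling_consecutives_spec : Claim_equal_rolling_consecutives := by
  intro s _
  unfold Spec_rolling_consecutives rolling_consecutives_alt
  rw [A_eq_rcGo, B_eq_rcGo]
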